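-- pv_equiv track=rewrite | github.com/AryanGanotra07/DSALGO | DP/goldPots.py | optimalStrategy
-- ===== SOURCE A (Python) =====
-- def calculate(T, i, j):
--     return T[i][j] if i <= j else 0
--
-- def optimalStrategy(coin):
--
--     n = len(coin)
--
--     # base case: one pot left, only one choice possible
--     if n == 1:
--         return coin[0]
--
--     # if we're left with only two pots, choose one with maximum coins
--     if n == 2:
--         return max(coin[0], coin[1])
--
--     # create a dynamic 2D matrix to store sub-problem solutions
--     T = [[0 for x in range(n)] for y in range(n)]
--
--     for iteration in range(n):
--         i = 0
--         j = iteration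
--         while j < n:
--             start = coin[i] + min(calculate(T, i + 2, j), calculate(T, i + 1, j - 1))
--             end = coin[j] + min(calculate(T, i + 1, j - 1), calculate(T, i, j - 2))
--             T[i][j] = max(start, end)
--             i = i + 1
--             j = j + 1
--
--     return T[0][n - 1]
-- ===== SOURCE B (Python) =====
-- def optimalStrategy(coin):
--     # top-down memoized min-max recursion instead of A's bottom-up diagonal table
--     n = len(coin)
--     memo = {}
--     def solve(i, j):
--         if i > j:
--             return 0
--         if (i, j) in memo:
--             return memo[(i, j)]
--         v = max(coin[i] + min(solve(i + 2, j), solve(i + 1, j - 1)),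
--                 coin[j] + min(solve(i + 1, j - 1), solve(i, j - 2)))
--         memo[(i, j)] = v
--         return v
--     return solve(0, n - 1)
-- ===== Notes on version B (the rewrite author's own statement) =====
-- stated objective: alternative
-- what changed: A fills an n x n table bottom-up, diagonal by diagonal, with a helper reading 0 below the diagonal; B is a top-down memoized recursion solve(i,j) of the min-max recurrence with a dict memo, computing only the intervals actually reachable and no table at all.
import Mathlib
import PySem

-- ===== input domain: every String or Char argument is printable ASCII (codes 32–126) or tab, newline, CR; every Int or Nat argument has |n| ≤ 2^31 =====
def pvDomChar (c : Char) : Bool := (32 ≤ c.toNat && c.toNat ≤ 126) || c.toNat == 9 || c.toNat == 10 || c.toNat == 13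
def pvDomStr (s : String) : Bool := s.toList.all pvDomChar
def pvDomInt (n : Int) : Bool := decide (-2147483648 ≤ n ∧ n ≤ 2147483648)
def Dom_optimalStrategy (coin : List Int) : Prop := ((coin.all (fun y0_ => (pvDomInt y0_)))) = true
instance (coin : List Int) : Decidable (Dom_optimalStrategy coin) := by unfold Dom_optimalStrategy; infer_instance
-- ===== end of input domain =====

-- B replaces A's bottom-up n×n table (filled diagonal by diagonal through a helper reading
-- 0 below the diagonal) by a top-down memoized recursion solve(i, j) over a dict
-- (objective: alternative decomposition, same asymptotic cost).

-- ===== PORT A =====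
-- Python helper `calculate(T, i, j)`; when i ≤ j the indices are always in range in A,
-- so the pyGetD defaults are never hit.
def pvCalc (T : List (List Int)) (i j : Int) : Int :=
  if i ≤ j then PySem.List.pyGetD (PySem.List.pyGetD T i []) j 0 else 0

-- Python `T[i][j] = v`; i, j are always nonnegative and in range where A assigns.
def pvSet2 (T : List (List Int)) (i j : Int) (v : Int) : List (List Int) :=
  T.set i.toNat ((PySem.List.pyGetD T i []).set j.toNat v)

-- the `while j < n` loop of A (fuel n is enough: j grows by 1 each step)
def pvInner (coin : List Int) (n : Nat) : Nat → Int → Int → List (List Int) → List (List Int)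
  | 0, _, _, T => T
  | fuel+1, i, j, T =>
    if j < (n : Int) then
      let start := PySem.List.pyGetD coin i 0 + min (pvCalc T (i+2) j) (pvCalc T (i+1) (j-1))
      let endv  := PySem.List.pyGetD coin j 0 + min (pvCalc T (i+1) (j-1)) (pvCalc T i (j-2))
      pvInner coin n fuel (i+1) (j+1) (pvSet2 T i j (max start endv))
    else T

def optimalStrategy (coin : List Int) : Int :=
  let n := coin.length
  if n = 1 then PySem.List.pyGetD coin 0 0
  else if n = 2 then max (PySem.List.pyGetD coin 0 0) (PySem.List.pyGetD coin 1 0)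
  else
    let T0 : List (List Int) := (List.range n).map (fun _ => (List.range n).map (fun _ => (0 : Int)))
    let T := (List.range n).foldl
      (fun (T : List (List Int)) (iteration : Nat) => pvInner coin n n 0 (iteration : Int) T) T0
    PySem.List.pyGetD (PySem.List.pyGetD T 0 []) ((n : Int) - 1) 0

-- ===== PORT B =====
-- Source B's `solve(i, j)` with its memo dict threaded through; the Nat fuel only makes the
-- recursion structural (each call shrinks j - i by 2, so fuel = len(coin) always suffices
-- and the fuel-0 branch is never reached on the calls Source B makes).
def pvSolve (coin : List Int) :
    Nat → Int → Int → PySem.Dict (Int × Int) Int → Int × PySem.Dict (Int × Int) Int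
  | 0, _, _, memo => (0, memo)
  | fuel+1, i, j, memo =>
    if i > j then (0, memo)
    else
      match memo.get? (i, j) with
      | some v => (v, memo)
      | none =>
        let r1 := pvSolve coin fuel (i+2) j memo
        let r2 := pvSolve coin fuel (i+1) (j-1) r1.2
        let s := PySem.List.pyGetD coin i 0 + min r1.1 r2.1
        let r3 := pvSolve coin fuel (i+1) (j-1) r2.2
        let r4 := pvSolve coin fuel i (j-2) r3.2
        let e := PySem.List.pyGetD coin j 0 + min r3.1 r4.1
        let v := max s e
        (v, r4.2.insert (i, j) v)

def optimalStrategy_alt (coin : List Int) : Int :=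
  (pvSolve coin coin.length 0 ((coin.length : Int) - 1) PySem.Dict.empty).1

-- ===== PRECONDITION & SPEC =====
-- Pre_ excludes only the empty list, on which A raises IndexError (T[0][-1] on an empty table).
def Pre_optimalStrategy (coin : List Int) : Prop := coin ≠ []
instance (coin : List Int) : Decidable (Pre_optimalStrategy coin) := by
  unfold Pre_optimalStrategy; infer_instance

def pvWitness_optimalStrategy : List Int := [4, 6, 2, 3]

def Spec_optimalStrategy (coin : List Int) (out : Int) : Prop := out = optimalStrategy_alt coin
instance (coin : List Int) (out : Int) : Decidable (Spec_optimalStrategy coin out) := by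
  unfold Spec_optimalStrategy; infer_instance

-- ===== CLAIM (what is proved, stated in full; the proofs are below) =====
def Claim_equal_optimalStrategy : Prop := ∀ (coin : List Int), Dom_optimalStrategy coin →
  Pre_optimalStrategy coin → Spec_optimalStrategy coin (optimalStrategy coin)

-- ===== LEMMAS AND PROOFS =====

-- the common value: pvF coin g i = the optimal take for pots i..i+g
def pvF (coin : List Int) : Nat → Nat → Int
  | 0, i => PySem.List.pyGetD coin (i : Int) 0
  | 1, i => max (PySem.List.pyGetD coin (i : Int) 0) (PySem.List.pyGetD coin ((i : Int) + 1) 0)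
  | (g+2), i =>
      max (PySem.List.pyGetD coin (i : Int) 0 +
             min (pvF coin g (i+2)) (pvF coin g (i+1)))
          (PySem.List.pyGetD coin ((i : Int) + (g : Int) + 2) 0 +
             min (pvF coin g (i+1)) (pvF coin g i))

def pvGet2 (T : List (List Int)) (i j : Nat) : Int := (T.getD i []).getD j 0

-- invariant of A's table: diagonals < k are filled, diagonal k is filled below row i0
def pvMid (coin : List Int) (n k i0 : Nat) (T : List (List Int)) : Prop :=
  T.length = n ∧ (∀ i, i < n → (T.getD i []).length = n) ∧
  ∀ i j, i < n → j < n →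
    pvGet2 T i j = if i ≤ j ∧ (j - i < k ∨ (j - i = k ∧ i < i0)) then pvF coin (j-i) i else 0

theorem pv_getD_set_self {α : Type} (xs : List α) (i : Nat) (v d : α) (h : i < xs.length) :
    (xs.set i v).getD i d = v := by
  simp [List.getD_eq_getElem?_getD, h]

theorem pv_getD_set_other {α : Type} (xs : List α) (i t : Nat) (v d : α) (h : i ≠ t) :
    (xs.set i v).getD t d = xs.getD t d := by
  simp [List.getD_eq_getElem?_getD, List.getElem?_set_ne h]

theorem pv_getD_map_range {α : Type} (m t : Nat) (f : Nat → α) (d : α) (h : t < m) :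
    ((List.range m).map f).getD t d = f t := by
  simp [List.getD_eq_getElem?_getD, List.getElem?_map, List.getElem?_range h]

theorem pvCalc_eq (T : List (List Int)) (a b : Nat) :
    pvCalc T (a : Int) (b : Int) = if a ≤ b then pvGet2 T a b else 0 := by
  simp [pvCalc, pvGet2, PySem.List.pyGetD_natCast]

theorem pvVal (coin : List Int) (n k i0 : Nat) (T : List (List Int))
    (h : pvMid coin n k i0 T) (hlt : i0 + k < n) :
    max (PySem.List.pyGetD coin (i0 : Int) 0 +
           min (pvCalc T ((i0:Int)+2) ((i0:Int)+(k:Int))) (pvCalc T ((i0:Int)+1) ((i0:Int)+(k:Int)-1)))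
        (PySem.List.pyGetD coin ((i0:Int)+(k:Int)) 0 +
           min (pvCalc T ((i0:Int)+1) ((i0:Int)+(k:Int)-1)) (pvCalc T (i0:Int) ((i0:Int)+(k:Int)-2)))
    = pvF coin k i0 := by
  match k with
  | 0 =>
    have c1 : pvCalc T ((i0:Int)+2) ((i0:Int)+((0:Nat):Int)) = 0 := by
      unfold pvCalc; rw [if_neg (by omega)]
    have c2 : pvCalc T ((i0:Int)+1) ((i0:Int)+((0:Nat):Int)-1) = 0 := by
      unfold pvCalc; rw [if_neg (by omega)]
    have c3 : pvCalc T (i0:Int) ((i0:Int)+((0:Nat):Int)-2) = 0 := by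
      unfold pvCalc; rw [if_neg (by omega)]
    rw [c1, c2, c3]
    simp [pvF]
  | 1 =>
    have c1 : pvCalc T ((i0:Int)+2) ((i0:Int)+((1:Nat):Int)) = 0 := by
      unfold pvCalc; rw [if_neg (by omega)]
    have c2 : pvCalc T ((i0:Int)+1) ((i0:Int)+((1:Nat):Int)-1) = 0 := by
      unfold pvCalc; rw [if_neg (by omega)]
    have c3 : pvCalc T (i0:Int) ((i0:Int)+((1:Nat):Int)-2) = 0 := by
      unfold pvCalc; rw [if_neg (by omega)]
    rw [c1, c2, c3]
    simp [pvF]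
  | (g+2) =>
    have e1 : pvCalc T ((i0:Int)+2) ((i0:Int)+((g+2:Nat):Int)) = pvF coin g (i0+2) := by
      rw [show ((i0:Int)+2) = ((i0+2:Nat):Int) by push_cast; ring,
          show ((i0:Int)+((g+2:Nat):Int)) = ((i0+2+g:Nat):Int) by push_cast; ring,
          pvCalc_eq, if_pos (by omega)]
      have hh := h.2.2 (i0+2) (i0+2+g) (by omega) (by omega)
      rw [hh, if_pos ⟨by omega, Or.inl (by omega)⟩, show i0+2+g-(i0+2) = g by omega]
    have e2 : pvCalc T ((i0:Int)+1) ((i0:Int)+((g+2:Nat):Int)-1) = pvF coin g (i0+1) := by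
      rw [show ((i0:Int)+1) = ((i0+1:Nat):Int) by push_cast; ring,
          show ((i0:Int)+((g+2:Nat):Int)-1) = ((i0+1+g:Nat):Int) by push_cast; ring,
          pvCalc_eq, if_pos (by omega)]
      have hh := h.2.2 (i0+1) (i0+1+g) (by omega) (by omega)
      rw [hh, if_pos ⟨by omega, Or.inl (by omega)⟩, show i0+1+g-(i0+1) = g by omega]
    have e3 : pvCalc T (i0:Int) ((i0:Int)+((g+2:Nat):Int)-2) = pvF coin g i0 := by
      rw [show ((i0:Int)+((g+2:Nat):Int)-2) = ((i0+g:Nat):Int) by push_cast; ring,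
          pvCalc_eq, if_pos (by omega)]
      have hh := h.2.2 i0 (i0+g) (by omega) (by omega)
      rw [hh, if_pos ⟨by omega, Or.inl (by omega)⟩, show i0+g-i0 = g by omega]
    rw [e1, e2, e3,
        show ((i0:Int)+((g+2:Nat):Int)) = (i0:Int)+(g:Int)+2 by push_cast; ring]
    simp only [pvF]

theorem pvMid_set (coin : List Int) (n k i0 : Nat) (T : List (List Int))
    (h : pvMid coin n k i0 T) (hlt : i0 + k < n) :
    pvMid coin n k (i0+1) (pvSet2 T (i0 : Int) ((i0+k : Nat) : Int) (pvF coin k i0)) := by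
  have hi0 : i0 < n := by omega
  have hlen : T.length = n := h.1
  have hrow : (T.getD i0 []).length = n := h.2.1 i0 hi0
  unfold pvSet2
  rw [Int.toNat_natCast, Int.toNat_natCast, PySem.List.pyGetD_natCast]
  refine ⟨by simp [hlen], ?_, ?_⟩
  · intro i hi
    by_cases hii : i = i0
    · subst hii
      rw [pv_getD_set_self _ _ _ _ (by omega), List.length_set]
      exact hrow
    · rw [pv_getD_set_other _ _ _ _ _ (fun e => hii e.symm)]
      exact h.2.1 i hi
  · intro i j hi hj
    unfold pvGet2
    by_cases hii : i = i0
    · subst hii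
      rw [pv_getD_set_self _ _ _ _ (by omega)]
      by_cases hjj : j = i + k
      · subst hjj
        rw [pv_getD_set_self _ _ _ _ (by omega)]
        rw [if_pos ⟨by omega, Or.inr ⟨by omega, by omega⟩⟩, show i+k-i = k by omega]
      · rw [pv_getD_set_other _ _ _ _ _ (fun e => hjj e.symm)]
        have hh := h.2.2 i j hi hj
        unfold pvGet2 at hh
        rw [hh]
        exact if_congr (by omega) rfl rfl
    · rw [pv_getD_set_other _ _ _ _ _ (fun e => hii e.symm)]
      have hh := h.2.2 i j hi hj
      unfold pvGet2 at hh
      rw [hh]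
      exact if_congr (by omega) rfl rfl

theorem pvInner_inv (coin : List Int) (n k : Nat) :
    ∀ (fuel i0 : Nat) (T : List (List Int)),
      pvMid coin n k i0 T → n ≤ fuel + i0 + k →
      pvMid coin n (k+1) 0 (pvInner coin n fuel (i0 : Int) ((i0:Int) + (k:Int)) T) := by
  intro fuel
  induction fuel with
  | zero =>
    intro i0 T hmid hle
    simp only [pvInner]
    refine ⟨hmid.1, hmid.2.1, ?_⟩
    intro i j hi hj
    rw [hmid.2.2 i j hi hj]
    exact if_congr (by omega) rfl rfl
  | succ fuel ih =>
    intro i0 T hmid hle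
    by_cases hcase : i0 + k < n
    · have hj : ((i0:Int) + (k:Int)) < (n:Int) := by omega
      simp only [pvInner, if_pos hj]
      rw [pvVal coin n k i0 T hmid hcase]
      rw [show ((i0:Int)+(k:Int)) = ((i0+k:Nat):Int) by push_cast; ring]
      have hset := pvMid_set coin n k i0 T hmid hcase
      have hrec := ih (i0+1) _ hset (by omega)
      rw [show (((i0+1:Nat)):Int) = (i0:Int)+1 by push_cast; ring,
          show ((i0:Int)+1) + (k:Int) = ((i0+k:Nat):Int)+1 by push_cast; ring] at hrec
      exact hrec
    · have hj : ¬ (((i0:Int) + (k:Int)) < (n:Int)) := by omega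
      simp only [pvInner, if_neg hj]
      refine ⟨hmid.1, hmid.2.1, ?_⟩
      intro i j hi hj'
      rw [hmid.2.2 i j hi hj']
      exact if_congr (by omega) rfl rfl

theorem pvOuter (coin : List Int) (n : Nat) (m : Nat) :
    pvMid coin n m 0 ((List.range m).foldl
      (fun (T : List (List Int)) (iteration : Nat) => pvInner coin n n 0 (iteration : Int) T)
      ((List.range n).map (fun _ => (List.range n).map (fun _ => (0 : Int))))) := by
  induction m with
  | zero =>
    simp only [List.range_zero, List.foldl_nil]
    refine ⟨by simp, ?_, ?_⟩
    · intro i hi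
      rw [pv_getD_map_range _ _ _ _ hi]
      simp
    · intro i j hi hj
      unfold pvGet2
      rw [pv_getD_map_range _ _ _ _ hi, pv_getD_map_range _ _ _ _ hj]
      rw [if_neg (by omega)]
  | succ m ih =>
    rw [List.range_succ, List.foldl_append, List.foldl_cons, List.foldl_nil]
    have := pvInner_inv coin n m n 0 _ ih (by omega)
    simpa only [Nat.cast_zero, zero_add] using this

theorem pvA_eq (coin : List Int) (h1 : coin ≠ []) :
    optimalStrategy coin = pvF coin (coin.length - 1) 0 := by
  have hn1 : 1 ≤ coin.length := List.length_pos_of_ne_nil h1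
  unfold optimalStrategy
  dsimp only
  by_cases he1 : coin.length = 1
  · rw [if_pos he1, he1]
    simp [pvF]
  · rw [if_neg he1]
    by_cases he2 : coin.length = 2
    · rw [if_pos he2, he2]
      simp [pvF]
    · rw [if_neg he2]
      have h3 : 3 ≤ coin.length := by omega
      have hm := pvOuter coin coin.length coin.length
      rw [PySem.List.pyGetD_zero,
          show ((coin.length : Int) - 1) = ((coin.length - 1 : Nat) : Int) by omega,
          PySem.List.pyGetD_natCast]
      have hh := hm.2.2 0 (coin.length - 1) (by omega) (by omega)
      unfold pvGet2 at hh
      rw [hh, if_pos ⟨by omega, Or.inl (by omega)⟩]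
      simp

-- ===== B side =====

-- memo invariant: every stored entry (i, j) ↦ v has 0 ≤ i ≤ j < n and v the true interval value
def pvInv (coin : List Int) (memo : PySem.Dict (Int × Int) Int) : Prop :=
  ∀ p v, memo.get? p = some v →
    ∃ a b : Nat, p = ((a : Int), (b : Int)) ∧ a ≤ b ∧ b < coin.length ∧ v = pvF coin (b - a) a

theorem pvSolve_spec (coin : List Int) :
    ∀ (fuel : Nat) (i j : Int) (memo : PySem.Dict (Int × Int) Int),
      pvInv coin memo → 0 ≤ i → j < (coin.length : Int) → (i ≤ j → j - i < 2 * fuel) →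
      (pvSolve coin fuel i j memo).1
        = (if i ≤ j then pvF coin (j - i).toNat i.toNat else 0)
      ∧ pvInv coin (pvSolve coin fuel i j memo).2 := by
  intro fuel
  induction fuel with
  | zero =>
    intro i j memo hInv hi hj hf
    simp only [pvSolve]
    exact ⟨by rw [if_neg (fun h => by have := hf h; omega)], hInv⟩
  | succ fuel ih =>
    intro i j memo hInv hi hj hf
    by_cases hij : i > j
    · simp only [pvSolve, if_pos hij]
      exact ⟨by rw [if_neg (by omega)], hInv⟩
    · have hle : i ≤ j := by omega
      rcases hm : memo.get? (i, j) with _ | v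
      · -- none: compute
        have h1 := ih (i+2) j memo hInv (by omega) hj (fun h => by omega)
        have h2 := ih (i+1) (j-1) (pvSolve coin fuel (i+2) j memo).2 h1.2 (by omega)
          (by omega) (fun h => by omega)
        have h3 := ih (i+1) (j-1) (pvSolve coin fuel (i+1) (j-1)
          (pvSolve coin fuel (i+2) j memo).2).2 h2.2 (by omega) (by omega) (fun h => by omega)
        have h4 := ih i (j-2) (pvSolve coin fuel (i+1) (j-1) (pvSolve coin fuel (i+1) (j-1)
          (pvSolve coin fuel (i+2) j memo).2).2).2 h3.2 hi (by omega) (fun h => by omega)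
        simp only [pvSolve, if_neg hij, hm]
        constructor
        · rw [if_pos hle]
          -- the computed value equals pvF coin (j-i).toNat i.toNat
          rw [h1.1, h2.1, h3.1, h4.1]
          obtain ⟨a, rfl⟩ : ∃ a : Nat, i = (a : Int) := ⟨i.toNat, by omega⟩
          have hgap : (j - (a:Int)).toNat = j.toNat - a := by omega
          match hg : (j - (a:Int)).toNat, hgap with
          | 0, _ =>
            rw [if_neg (by omega), if_neg (by omega), if_neg (by omega)]
            have : j = (a : Int) := by omega
            subst this
            simp [pvF]
          | 1, _ =>
            rw [if_neg (by omega), if_neg (by omega), if_neg (by omega)]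
            have : j = (a : Int) + 1 := by omega
            subst this
            simp [pvF]
          | (g+2), _ =>
            have hj2 : j = (a : Int) + (g : Int) + 2 := by omega
            subst hj2
            rw [if_pos (by omega), if_pos (by omega), if_pos (by omega)]
            rw [show ((a:Int)+(g:Int)+2 - ((a:Int)+2)).toNat = g by omega,
                show ((a:Int)+(g:Int)+2 - 1 - ((a:Int)+1)).toNat = g by omega,
                show ((a:Int)+(g:Int)+2 - 2 - (a:Int)).toNat = g by omega,
                show ((a:Int)+2).toNat = a + 2 by omega,
                show ((a:Int)+1).toNat = a + 1 by omega,
                Int.toNat_natCast]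
            simp only [pvF]
        · -- invariant after insert
          intro p v hp
          by_cases hpk : p = (i, j)
          · subst hpk
            rw [PySem.Dict.get?_insert_self] at hp
            obtain ⟨a, rfl⟩ : ∃ a : Nat, i = (a : Int) := ⟨i.toNat, by omega⟩
            obtain ⟨b, rfl⟩ : ∃ b : Nat, j = (b : Int) := ⟨j.toNat, by omega⟩
            refine ⟨a, b, rfl, by omega, by omega, ?_⟩
            have hv := (Option.some.injEq _ _).mp hp
            rw [← hv, h1.1, h2.1, h3.1, h4.1]
            have hgap : b - a = ((b:Int) - (a:Int)).toNat := by omega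
            match hg : b - a, hgap with
            | 0, _ =>
              rw [if_neg (by omega), if_neg (by omega), if_neg (by omega)]
              have : (b:Int) = (a : Int) := by omega
              rw [this]
              simp [pvF]
            | 1, _ =>
              rw [if_neg (by omega), if_neg (by omega), if_neg (by omega)]
              have : (b:Int) = (a : Int) + 1 := by omega
              rw [this]
              simp [pvF]
            | (g+2), _ =>
              have hb : (b:Int) = (a : Int) + (g : Int) + 2 := by omega
              rw [hb]
              rw [if_pos (by omega), if_pos (by omega), if_pos (by omega)]
              rw [show ((a:Int)+(g:Int)+2 - ((a:Int)+2)).toNat = g by omega,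
                  show ((a:Int)+(g:Int)+2 - 1 - ((a:Int)+1)).toNat = g by omega,
                  show ((a:Int)+(g:Int)+2 - 2 - (a:Int)).toNat = g by omega,
                  show ((a:Int)+2).toNat = a + 2 by omega,
                  show ((a:Int)+1).toNat = a + 1 by omega,
                  Int.toNat_natCast]
              simp only [pvF]
          · rw [PySem.Dict.get?_insert_of_ne _ _ hpk] at hp
            exact h4.2 p v hp
      · -- memo hit
        simp only [pvSolve, if_neg hij, hm]
        obtain ⟨a, b, hpe, hab, hbn, hv⟩ := hInv (i, j) v hm
        have hia : i = (a : Int) := congrArg Prod.fst hpe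
        have hjb : j = (b : Int) := congrArg Prod.snd hpe
        refine ⟨?_, hInv⟩
        rw [if_pos hle, hv, hia, hjb,
            show ((b:Int) - (a:Int)).toNat = b - a by omega, Int.toNat_natCast]

theorem pvB_eq (coin : List Int) (h1 : coin ≠ []) :
    optimalStrategy_alt coin = pvF coin (coin.length - 1) 0 := by
  have hn1 : 1 ≤ coin.length := List.length_pos_of_ne_nil h1
  have hInv : pvInv coin PySem.Dict.empty := by
    intro p v hp
    rw [PySem.Dict.get?_empty] at hp
    exact absurd hp (by simp)
  have h := pvSolve_spec coin coin.length 0 ((coin.length : Int) - 1) PySem.Dict.empty hInv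
    (by omega) (by omega) (fun _ => by omega)
  unfold optimalStrategy_alt
  rw [h.1, if_pos (by omega)]
  norm_num

-- ===== VERDICT (by name: the statement is the Claim_ definition above) =====
theorem optimalStrategy_spec : Claim_equal_optimalStrategy := by
  intro coin _ hpre
  show optimalStrategy coin = optimalStrategy_alt coin
  rw [pvA_eq coin hpre, pvB_eq coin hpre]
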